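-- pv_equiv track=rewrite | github.com/yamashirotakashi/technical-fountain-series-support-tool | CodeBlockOverFlowDisposal/overflow_detector_image.py | _has_border_lines
-- ===== SOURCE A (Python) =====
-- from typing import List, Optional, Dict, Tuple
--
-- def _has_border_lines(x: int, y: int, w: int, h: int,
--                      h_lines: List, v_lines: List, tolerance: int = 10) -> bool:
--     """
--     矩形の周囲に罫線があるかチェック（簡易版）
--     """
--     # 上下左右に線があるかチェック
--     has_top = any(abs(ly - y) < tolerance and lx1 <= x and lx2 >= x + w
--                  for lx1, ly, lx2, _ in h_lines)
--     has_bottom = any(abs(ly - (y + h)) < tolerance and lx1 <= x and lx2 >= x + w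
--                     for lx1, ly, lx2, _ in h_lines)
--     has_left = any(abs(lx - x) < tolerance and ly1 <= y and ly2 >= y + h
--                   for lx, ly1, _, ly2 in v_lines)
--     has_right = any(abs(lx - (x + w)) < tolerance and ly1 <= y and ly2 >= y + h
--                    for lx, ly1, _, ly2 in v_lines)
--
--     # 4辺のうち3辺以上に線があれば罫線囲みと判定
--     return sum([has_top, has_bottom, has_left, has_right]) >= 3
-- ===== SOURCE B (Python) =====
-- from typing import List
--
-- _TOP, _BOTTOM, _LEFT, _RIGHT = 0, 1, 2, 3
--
-- def _sides_of(line, is_h, x, y, w, h, tolerance):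
--     """Classify one line: which of the rectangle's sides does it certify?"""
--     sides = set()
--     if is_h:
--         lx1, ly, lx2, _ = line
--         if lx1 <= x and lx2 >= x + w:
--             if abs(ly - y) < tolerance:
--                 sides.add(_TOP)
--             if abs(ly - (y + h)) < tolerance:
--                 sides.add(_BOTTOM)
--     else:
--         lx, ly1, _, ly2 = line
--         if ly1 <= y and ly2 >= y + h:
--             if abs(lx - x) < tolerance:
--                 sides.add(_LEFT)
--             if abs(lx - (x + w)) < tolerance:
--                 sides.add(_RIGHT)
--     return sides
--
-- def _has_border_lines(x: int, y: int, w: int, h: int,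
--                       h_lines: List, v_lines: List, tolerance: int = 10) -> bool:
--     # Instead of one scan per side, visit each line ONCE, classify it into the
--     # set of sides it certifies, and stop as soon as 3 distinct sides are covered.
--     sides = set()
--     for line in h_lines:
--         sides |= _sides_of(line, True, x, y, w, h, tolerance)
--         if len(sides) >= 3:
--             return True
--     for line in v_lines:
--         sides |= _sides_of(line, False, x, y, w, h, tolerance)
--         if len(sides) >= 3:
--             return True
--     return False
-- ===== Notes on version B (the rewrite author's own statement) =====
-- stated objective: alternative
-- what changed: Inverts the iteration: instead of four per-side any() scans over the line lists, B visits each line once, classifies it into the set of sides it certifies, accumulates a set of covered sides, and returns early as soon as 3 distinct sides are covered.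
import Mathlib
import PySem

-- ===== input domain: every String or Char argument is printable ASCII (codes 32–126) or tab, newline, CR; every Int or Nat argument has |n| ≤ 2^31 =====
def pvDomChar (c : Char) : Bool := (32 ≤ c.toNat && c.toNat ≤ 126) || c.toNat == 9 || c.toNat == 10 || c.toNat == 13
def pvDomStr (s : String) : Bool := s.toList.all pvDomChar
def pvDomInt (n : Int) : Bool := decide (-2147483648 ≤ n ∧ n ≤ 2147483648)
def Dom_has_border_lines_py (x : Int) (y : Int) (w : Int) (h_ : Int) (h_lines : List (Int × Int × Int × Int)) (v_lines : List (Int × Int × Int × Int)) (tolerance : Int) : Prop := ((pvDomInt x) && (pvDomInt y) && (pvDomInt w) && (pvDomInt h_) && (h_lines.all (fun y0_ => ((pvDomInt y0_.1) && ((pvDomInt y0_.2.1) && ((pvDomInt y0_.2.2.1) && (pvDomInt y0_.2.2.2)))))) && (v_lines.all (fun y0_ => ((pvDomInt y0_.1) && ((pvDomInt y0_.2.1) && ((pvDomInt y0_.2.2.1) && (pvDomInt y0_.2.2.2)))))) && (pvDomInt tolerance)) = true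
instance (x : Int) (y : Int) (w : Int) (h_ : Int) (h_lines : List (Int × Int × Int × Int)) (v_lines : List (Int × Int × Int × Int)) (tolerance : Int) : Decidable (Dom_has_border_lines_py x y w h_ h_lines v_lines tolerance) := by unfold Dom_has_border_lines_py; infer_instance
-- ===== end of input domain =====

-- B inverts the iteration: instead of A's four per-side `any` scans over the line lists,
-- B visits each line once, classifies it into the set of sides it certifies, accumulates
-- that set, and returns early once 3 distinct sides are covered. Same asymptotic cost.

-- ===== PORT A =====
def has_border_lines_py (x : Int) (y : Int) (w : Int) (h_ : Int) (h_lines : List (Int × Int × Int × Int)) (v_lines : List (Int × Int × Int × Int)) (tolerance : Int) : Bool :=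
  let has_top := h_lines.any (fun l =>
    ((l.2.1 - y).natAbs : Int) < tolerance && l.1 ≤ x && l.2.2.1 ≥ x + w)
  let has_bottom := h_lines.any (fun l =>
    ((l.2.1 - (y + h_)).natAbs : Int) < tolerance && l.1 ≤ x && l.2.2.1 ≥ x + w)
  let has_left := v_lines.any (fun l =>
    ((l.1 - x).natAbs : Int) < tolerance && l.2.1 ≤ y && l.2.2.2 ≥ y + h_)
  let has_right := v_lines.any (fun l =>
    ((l.1 - (x + w)).natAbs : Int) < tolerance && l.2.1 ≤ y && l.2.2.2 ≥ y + h_)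
  ((if has_top then (1:Int) else 0) + (if has_bottom then 1 else 0)
    + (if has_left then 1 else 0) + (if has_right then 1 else 0)) ≥ 3

-- ===== PORT B =====
-- _sides_of: which sides (0=top,1=bottom,2=left,3=right) does this one line certify?
def pvSidesOf (line : Int × Int × Int × Int) (is_h : Bool) (x : Int) (y : Int) (w : Int) (h_ : Int) (tolerance : Int) : PySem.Set Int :=
  let sides : PySem.Set Int := PySem.Set.empty
  if is_h then
    if line.1 ≤ x && line.2.2.1 ≥ x + w then
      let sides := if ((line.2.1 - y).natAbs : Int) < tolerance then PySem.Set.add sides 0 else sides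
      let sides := if ((line.2.1 - (y + h_)).natAbs : Int) < tolerance then PySem.Set.add sides 1 else sides
      sides
    else sides
  else
    if line.2.1 ≤ y && line.2.2.2 ≥ y + h_ then
      let sides := if ((line.1 - x).natAbs : Int) < tolerance then PySem.Set.add sides 2 else sides
      let sides := if ((line.1 - (x + w)).natAbs : Int) < tolerance then PySem.Set.add sides 3 else sides
      sides
    else sides

-- the second loop (over v_lines), with early exit at 3 covered sides
def pvLoopV (x : Int) (y : Int) (w : Int) (h_ : Int) (tolerance : Int) (sides : PySem.Set Int) : List (Int × Int × Int × Int) → Bool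
  | [] => false
  | line :: rest =>
    let s := PySem.Set.union sides (pvSidesOf line false x y w h_ tolerance)
    if 3 ≤ s.length then true else pvLoopV x y w h_ tolerance s rest

-- the first loop (over h_lines); falls through into the v-loop
def pvLoopH (x : Int) (y : Int) (w : Int) (h_ : Int) (tolerance : Int) (v_lines : List (Int × Int × Int × Int)) (sides : PySem.Set Int) : List (Int × Int × Int × Int) → Bool
  | [] => pvLoopV x y w h_ tolerance sides v_lines
  | line :: rest =>
    let s := PySem.Set.union sides (pvSidesOf line true x y w h_ tolerance)
    if 3 ≤ s.length then true else pvLoopH x y w h_ tolerance v_lines s rest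

def has_border_lines_py_alt (x : Int) (y : Int) (w : Int) (h_ : Int) (h_lines : List (Int × Int × Int × Int)) (v_lines : List (Int × Int × Int × Int)) (tolerance : Int) : Bool :=
  pvLoopH x y w h_ tolerance v_lines PySem.Set.empty h_lines

-- ===== PRECONDITION & SPEC =====
def Spec_has_border_lines_py (x : Int) (y : Int) (w : Int) (h_ : Int) (h_lines : List (Int × Int × Int × Int)) (v_lines : List (Int × Int × Int × Int)) (tolerance : Int) (out : Bool) : Prop := out = has_border_lines_py_alt x y w h_ h_lines v_lines tolerance
instance (x : Int) (y : Int) (w : Int) (h_ : Int) (h_lines : List (Int × Int × Int × Int)) (v_lines : List (Int × Int × Int × Int)) (tolerance : Int) (out : Bool) : Decidable (Spec_has_border_lines_py x y w h_ h_lines v_lines tolerance out) := by unfold Spec_has_border_lines_py; infer_instance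

-- ===== CLAIM (what is proved, stated in full; the proofs are below) =====
def Claim_equal_has_border_lines_py : Prop := ∀ (x : Int) (y : Int) (w : Int) (h_ : Int) (h_lines : List (Int × Int × Int × Int)) (v_lines : List (Int × Int × Int × Int)) (tolerance : Int), Dom_has_border_lines_py x y w h_ h_lines v_lines tolerance → Spec_has_border_lines_py x y w h_ h_lines v_lines tolerance (has_border_lines_py x y w h_ h_lines v_lines tolerance)

-- ===== LEMMAS AND PROOFS =====

-- membership in the accumulated fold of unions
theorem mem_fold_union {g : (Int × Int × Int × Int) → PySem.Set Int} (L : List (Int × Int × Int × Int)) (s : PySem.Set Int) (e : Int) :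
    e ∈ L.foldl (fun s l => PySem.Set.union s (g l)) s ↔ e ∈ s ∨ ∃ l ∈ L, e ∈ g l := by
  induction L generalizing s with
  | nil => simp
  | cons hd tl ih =>
    simp only [List.foldl_cons, ih, PySem.Set.mem_union, List.mem_cons]
    constructor
    · rintro ((h | h) | ⟨l, hl, h⟩)
      · exact Or.inl h
      · exact Or.inr ⟨hd, Or.inl rfl, h⟩
      · exact Or.inr ⟨l, Or.inr hl, h⟩
    · rintro (h | ⟨l, (rfl | hl), h⟩)
      · exact Or.inl (Or.inl h)
      · exact Or.inl (Or.inr h)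
      · exact Or.inr ⟨l, hl, h⟩

theorem nodup_fold_union {g : (Int × Int × Int × Int) → PySem.Set Int} (L : List (Int × Int × Int × Int)) (s : PySem.Set Int) (hs : s.Nodup) :
    (L.foldl (fun s l => PySem.Set.union s (g l)) s).Nodup := by
  induction L generalizing s with
  | nil => exact hs
  | cons hd tl ih => exact ih _ (PySem.Set.nodup_union _ _ hs)

theorem len_fold_union_mono {g : (Int × Int × Int × Int) → PySem.Set Int} (L : List (Int × Int × Int × Int)) (s : PySem.Set Int) (hs : s.Nodup) :
    s.length ≤ (L.foldl (fun s l => PySem.Set.union s (g l)) s).length := by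
  refine List.Subperm.length_le (List.Nodup.subperm hs ?_)
  intro e he
  exact (mem_fold_union L s e).2 (Or.inl he)

-- the v-loop computes "3 ≤ |final set|", given we have not yet reached 3
theorem loopV_eq (x y w h_ tolerance : Int) (L : List (Int × Int × Int × Int)) (sides : PySem.Set Int)
    (hnd : sides.Nodup) (hlt : sides.length < 3) :
    pvLoopV x y w h_ tolerance sides L
      = decide (3 ≤ (L.foldl (fun s l => PySem.Set.union s (pvSidesOf l false x y w h_ tolerance)) sides).length) := by
  induction L generalizing sides with
  | nil => simp [pvLoopV]; omega
  | cons hd tl ih =>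
    simp only [pvLoopV, List.foldl_cons]
    by_cases h3 : 3 ≤ (PySem.Set.union sides (pvSidesOf hd false x y w h_ tolerance)).length
    · rw [if_pos h3]
      have := len_fold_union_mono (g := fun l => pvSidesOf l false x y w h_ tolerance) tl
        (PySem.Set.union sides (pvSidesOf hd false x y w h_ tolerance))
        (PySem.Set.nodup_union sides (pvSidesOf hd false x y w h_ tolerance) hnd)
      simp only at this
      symm
      exact decide_eq_true (by omega)
    · rw [if_neg h3, ih _ (PySem.Set.nodup_union sides (pvSidesOf hd false x y w h_ tolerance) hnd) (by omega)]
      rfl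

-- the h-loop falls through into the v-loop; same characterisation
theorem loopH_eq (x y w h_ tolerance : Int) (v_lines L : List (Int × Int × Int × Int)) (sides : PySem.Set Int)
    (hnd : sides.Nodup) (hlt : sides.length < 3) :
    pvLoopH x y w h_ tolerance v_lines sides L
      = decide (3 ≤ (v_lines.foldl (fun s l => PySem.Set.union s (pvSidesOf l false x y w h_ tolerance))
          (L.foldl (fun s l => PySem.Set.union s (pvSidesOf l true x y w h_ tolerance)) sides)).length) := by
  induction L generalizing sides with
  | nil => simpa [pvLoopH] using loopV_eq x y w h_ tolerance v_lines sides hnd hlt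
  | cons hd tl ih =>
    simp only [pvLoopH, List.foldl_cons]
    by_cases h3 : 3 ≤ (PySem.Set.union sides (pvSidesOf hd true x y w h_ tolerance)).length
    · rw [if_pos h3]
      have h1 := len_fold_union_mono (g := fun l => pvSidesOf l true x y w h_ tolerance) tl
        (PySem.Set.union sides (pvSidesOf hd true x y w h_ tolerance))
        (PySem.Set.nodup_union sides (pvSidesOf hd true x y w h_ tolerance) hnd)
      have h2 := len_fold_union_mono (g := fun l => pvSidesOf l false x y w h_ tolerance) v_lines
        (tl.foldl (fun s l => PySem.Set.union s (pvSidesOf l true x y w h_ tolerance))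
          (PySem.Set.union sides (pvSidesOf hd true x y w h_ tolerance)))
        (nodup_fold_union tl _ (PySem.Set.nodup_union sides (pvSidesOf hd true x y w h_ tolerance) hnd))
      simp only at h1 h2
      symm
      exact decide_eq_true (by omega)
    · rw [if_neg h3, ih _ (PySem.Set.nodup_union sides (pvSidesOf hd true x y w h_ tolerance) hnd) (by omega)]
      rfl

-- membership in the sides a single line certifies
theorem mem_sidesOf_h (x y w h_ tolerance : Int) (l : Int × Int × Int × Int) (e : Int) :
    e ∈ pvSidesOf l true x y w h_ tolerance ↔
      ((l.1 ≤ x ∧ l.2.2.1 ≥ x + w) ∧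
        ((((l.2.1 - y).natAbs : Int) < tolerance ∧ e = 0) ∨
         (((l.2.1 - (y + h_)).natAbs : Int) < tolerance ∧ e = 1))) := by
  unfold pvSidesOf
  simp only [if_true, Bool.and_eq_true, decide_eq_true_eq]
  split_ifs with hg c0 c1 c1 <;>
    simp_all [PySem.Set.empty]

theorem mem_sidesOf_v (x y w h_ tolerance : Int) (l : Int × Int × Int × Int) (e : Int) :
    e ∈ pvSidesOf l false x y w h_ tolerance ↔
      ((l.2.1 ≤ y ∧ l.2.2.2 ≥ y + h_) ∧
        ((((l.1 - x).natAbs : Int) < tolerance ∧ e = 2) ∨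
         (((l.1 - (x + w)).natAbs : Int) < tolerance ∧ e = 3))) := by
  unfold pvSidesOf
  simp only [Bool.false_eq_true, if_false, Bool.and_eq_true, decide_eq_true_eq]
  split_ifs with hg c0 c1 c1 <;>
    simp_all [PySem.Set.empty]

-- a duplicate-free list of side tags has length = number of present tags
theorem length_eq_indicators (F : List Int) (hnd : F.Nodup)
    (hsub : ∀ e ∈ F, e = 0 ∨ e = 1 ∨ e = 2 ∨ e = 3) :
    F.length = (if 0 ∈ F then 1 else 0) + (if 1 ∈ F then 1 else 0)
      + (if 2 ∈ F then 1 else 0) + (if (3:Int) ∈ F then 1 else 0) := by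
  induction F with
  | nil => simp
  | cons a t ih =>
    have hat : a ∉ t := (List.nodup_cons.mp hnd).1
    have iht := ih (List.nodup_cons.mp hnd).2 (fun e he => hsub e (List.mem_cons_of_mem a he))
    rcases hsub a (List.mem_cons_self) with rfl | rfl | rfl | rfl <;>
      simp_all [List.mem_cons] <;> omega

-- the int-sum-of-indicators test equals the nat-sum-of-indicators test
theorem ind_ge_three (a b c d : Bool) :
    decide (3 ≤ ((if a = true then (1:Int) else 0) + (if b = true then 1 else 0)
      + (if c = true then 1 else 0) + (if d = true then 1 else 0)))
    = decide (3 ≤ ((if a = true then 1 else 0) + (if b = true then 1 else 0)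
      + (if c = true then 1 else 0) + (if d = true then 1 else 0) : Nat)) := by
  cases a <;> cases b <;> cases c <;> cases d <;> decide

set_option maxHeartbeats 2000000 in
theorem has_border_lines_py_spec_aux (x y w h_ tolerance : Int)
    (h_lines v_lines : List (Int × Int × Int × Int)) :
    has_border_lines_py x y w h_ h_lines v_lines tolerance
      = has_border_lines_py_alt x y w h_ h_lines v_lines tolerance := by
  rw [has_border_lines_py_alt, loopH_eq x y w h_ tolerance v_lines h_lines PySem.Set.empty
    (by simp [PySem.Set.empty]) (by simp [PySem.Set.empty])]
  set F := v_lines.foldl (fun s l => PySem.Set.union s (pvSidesOf l false x y w h_ tolerance))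
      (h_lines.foldl (fun s l => PySem.Set.union s (pvSidesOf l true x y w h_ tolerance)) PySem.Set.empty) with hF
  have hnd : F.Nodup := nodup_fold_union _ _ (nodup_fold_union _ _ (by simp [PySem.Set.empty]))
  have hmem : ∀ e, e ∈ F ↔ (∃ l ∈ h_lines, e ∈ pvSidesOf l true x y w h_ tolerance)
      ∨ (∃ l ∈ v_lines, e ∈ pvSidesOf l false x y w h_ tolerance) := by
    intro e
    rw [hF, mem_fold_union, mem_fold_union]
    simp [PySem.Set.empty]
  have hsub : ∀ e ∈ F, e = 0 ∨ e = 1 ∨ e = 2 ∨ e = 3 := by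
    intro e he
    rcases (hmem e).1 he with ⟨l, _, hl⟩ | ⟨l, _, hl⟩
    · rcases (mem_sidesOf_h x y w h_ tolerance l e).1 hl with ⟨_, ⟨_, rfl⟩ | ⟨_, rfl⟩⟩ <;> tauto
    · rcases (mem_sidesOf_v x y w h_ tolerance l e).1 hl with ⟨_, ⟨_, rfl⟩ | ⟨_, rfl⟩⟩ <;> tauto
  rw [length_eq_indicators F hnd hsub]
  have h0 : (0 ∈ F) ↔ (h_lines.any (fun l =>
      ((l.2.1 - y).natAbs : Int) < tolerance && l.1 ≤ x && l.2.2.1 ≥ x + w) = true) := by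
    rw [hmem]; simp [mem_sidesOf_h, mem_sidesOf_v, List.any_eq_true]; tauto
  have h1 : ((1:Int) ∈ F) ↔ (h_lines.any (fun l =>
      ((l.2.1 - (y + h_)).natAbs : Int) < tolerance && l.1 ≤ x && l.2.2.1 ≥ x + w) = true) := by
    rw [hmem]; simp [mem_sidesOf_h, mem_sidesOf_v, List.any_eq_true]; tauto
  have h2 : ((2:Int) ∈ F) ↔ (v_lines.any (fun l =>
      ((l.1 - x).natAbs : Int) < tolerance && l.2.1 ≤ y && l.2.2.2 ≥ y + h_) = true) := by
    rw [hmem]; simp [mem_sidesOf_h, mem_sidesOf_v, List.any_eq_true]; tauto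
  have h3 : ((3:Int) ∈ F) ↔ (v_lines.any (fun l =>
      ((l.1 - (x + w)).natAbs : Int) < tolerance && l.2.1 ≤ y && l.2.2.2 ≥ y + h_) = true) := by
    rw [hmem]; simp [mem_sidesOf_h, mem_sidesOf_v, List.any_eq_true]; tauto
  rw [has_border_lines_py]
  simp only [ge_iff_le] at h0 h1 h2 h3 ⊢
  rw [if_congr h0 rfl rfl, if_congr h1 rfl rfl, if_congr h2 rfl rfl, if_congr h3 rfl rfl]
  exact ind_ge_three _ _ _ _

-- ===== VERDICT (by name: the statement is the Claim_ definition above) =====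
theorem has_border_lines_py_spec : Claim_equal_has_border_lines_py := by
  intro x y w h_ h_lines v_lines tolerance _
  exact has_border_lines_py_spec_aux x y w h_ tolerance h_lines v_lines
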